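-- pv_equiv track=rewrite | github.com/Josverl/tomli | src/tomli/_re.py | _scan_digits_with_underscores
-- ===== SOURCE A (Python) =====
-- def _scan_digits_with_underscores(
--     src: str, pos: int, allowed: frozenset[str]
-- ) -> int | None:
--     if pos >= len(src) or src[pos] not in allowed:
--         return None
--
--     i = pos + 1
--     while i < len(src):
--         char = src[i]
--         if char in allowed:
--             i += 1
--             continue
--         if char == "_" and i + 1 < len(src) and src[i + 1] in allowed:
--             i += 2
--             continue
--         break
--     return i
-- ===== SOURCE B (Python) =====
-- import re
--
--
-- def _scan_digits_with_underscores(src, pos, allowed):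
--     # Only single-character members can ever equal a one-character slice src[i].
--     chars = [c for c in allowed if len(c) == 1]
--     if not chars:
--         return None
--     if pos < 0:
--         return None  # a scan position counts from the start; nothing matches before it
--     digit = "[" + "".join(map(re.escape, chars)) + "]"
--     m = re.compile(digit + "(?:_?" + digit + ")*").match(src, pos)
--     return m.end() if m is not None else None
-- ===== Notes on version B (the rewrite author's own statement) =====
-- stated objective: idiomatic
-- what changed: B replaces A's hand-written index loop by compiling the anchored regex X(?:_?X)* from the escaped single-character members of `allowed` and returning m.end() of pattern.match(src, pos), guarding the empty class.
-- intended difference: For in-range negative pos whose wrapped-around character is in allowed, A's Python negative indexing scans as if pos counted from the end and returns an int (e.g. 1 on ('5', -1, {'5'})), while B returns None, the intended value since a position before the start of src is not a valid scan position. — e.g. on _scan_digits_with_underscores("5", -1, ["5"]): A returns some 1, B returns none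
import Mathlib
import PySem

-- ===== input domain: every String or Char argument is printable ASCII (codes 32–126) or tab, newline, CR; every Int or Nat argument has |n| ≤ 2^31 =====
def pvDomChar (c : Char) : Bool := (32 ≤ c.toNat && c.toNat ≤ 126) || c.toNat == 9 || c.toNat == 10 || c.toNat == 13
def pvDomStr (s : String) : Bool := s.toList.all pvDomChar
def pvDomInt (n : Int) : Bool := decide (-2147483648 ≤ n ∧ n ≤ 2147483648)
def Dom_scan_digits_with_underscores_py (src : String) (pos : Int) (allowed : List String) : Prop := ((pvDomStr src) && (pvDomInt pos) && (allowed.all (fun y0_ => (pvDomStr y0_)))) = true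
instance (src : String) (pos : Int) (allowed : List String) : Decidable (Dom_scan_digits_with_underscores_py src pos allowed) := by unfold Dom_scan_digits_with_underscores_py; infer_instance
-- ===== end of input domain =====

-- B re-implements the scan as the anchored regex X(?:_?X)* over the class of allowed chars
-- (idiomatic); equivalence is about the return value (neither program mutates anything).

-- ===== PORT A =====
-- Python's src[i] is a 1-character string; `src[i] in allowed` tests that string's membership.
def pvCharMemA (c : Char) (allowed : List String) : Bool := decide (String.ofList [c] ∈ allowed)

-- the `while i < len(src): …` loop of A (i may be negative: Python indexing wraps via pyGet?)
def pvScanLoopA (s : List Char) (allowed : List String) (i : Int) : Option Int :=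
  if _hlt : i < (s.length : Int) then
    match PySem.List.pyGet? s i with
    | none => none   -- IndexError: Python would raise here (possible only for i < -len, outside Pre_)
    | some ch =>
      if pvCharMemA ch allowed then pvScanLoopA s allowed (i + 1)
      else if ch = '_' ∧ i + 1 < (s.length : Int) ∧
              (PySem.List.pyGet? s (i + 1)).any (fun c2 => pvCharMemA c2 allowed) then
        pvScanLoopA s allowed (i + 2)
      else some i
  else some i
termination_by ((s.length : Int) - i).toNat
decreasing_by all_goals omega

def scan_digits_with_underscores_py (src : String) (pos : Int) (allowed : List String) : Option Int :=
  if pos ≥ PySem.Str.len src then none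
  else match PySem.List.pyGet? src.toList pos with
    | none => none   -- IndexError on src[pos] (pos < -len(src)); excluded by Pre_
    | some c =>
      if pvCharMemA c allowed then pvScanLoopA src.toList allowed (pos + 1)
      else none

-- ===== PORT B =====
-- Source B's `chars = [c for c in allowed if len(c) == 1]`, held as the chars of the regex class
def pvCls (allowed : List String) : List Char :=
  allowed.filterMap (fun a => match a.toList with | [c] => some c | _ => none)

-- the star part `(?:_?X)*` of Source B's regex, matched greedily from q: each iteration tries
-- `_X` first (greedy `_?`, backtracking to the empty option), else `X`, else the star stops;
-- exact for this pattern since nothing follows the star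
def pvStarB (s : List Char) (cls : List Char) (q : Nat) : Nat :=
  if h1 : s[q]? = some '_' ∧ s[q+1]?.any cls.contains then pvStarB s cls (q + 2)
  else if h2 : s[q]?.any cls.contains then pvStarB s cls (q + 1)
  else q
termination_by s.length - q
decreasing_by
  · have : q + 1 < s.length := by
      rcases h1 with ⟨-, h⟩
      cases hx : s[q+1]? with
      | none => rw [hx] at h; simp at h
      | some _ => exact (List.getElem?_eq_some_iff.mp hx).1
    omega
  · have : q < s.length := by
      cases hx : s[q]? with
      | none => rw [hx] at h2; simp at h2
      | some _ => exact (List.getElem?_eq_some_iff.mp hx).1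
    omega

def scan_digits_with_underscores_py_alt (src : String) (pos : Int) (allowed : List String) : Option Int :=
  if (pvCls allowed).isEmpty then none   -- empty class: never emit an invalid `[]` regex
  else if pos < 0 then none              -- a scan position counts from the start of src
  else if (src.toList[pos.toNat]?).any (pvCls allowed).contains then
    some ((pvStarB src.toList (pvCls allowed) (pos.toNat + 1) : Nat) : Int)   -- m.end()
  else none

-- ===== PRECONDITION & SPEC =====
-- Pre_ excludes only pos < -len(src), where A raises IndexError on src[pos].
def Pre_scan_digits_with_underscores_py (src : String) (pos : Int) (allowed : List String) : Prop :=
  -(src.toList.length : Int) ≤ pos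
instance (src : String) (pos : Int) (allowed : List String) : Decidable (Pre_scan_digits_with_underscores_py src pos allowed) := by unfold Pre_scan_digits_with_underscores_py; infer_instance

def pvWitness_scan_digits_with_underscores_py : String × Int × List String := ("1_0", 0, ["0", "1"])

-- On in-range negative pos whose wrapped-around character is in allowed, A's Python negative
-- indexing scans as if pos counted from the end and returns an int, while B returns None, the
-- intended value since a position before the start of src is not a valid scan position.
def D_scan_digits_with_underscores_py (src : String) (pos : Int) (allowed : List String) : Prop :=
  pos < 0 ∧ -(src.toList.length : Int) ≤ pos ∧
    String.ofList [src.toList[((src.toList.length : Int) + pos).toNat]!] ∈ allowed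
instance (src : String) (pos : Int) (allowed : List String) : Decidable (D_scan_digits_with_underscores_py src pos allowed) := by unfold D_scan_digits_with_underscores_py; infer_instance

def Spec_scan_digits_with_underscores_py (src : String) (pos : Int) (allowed : List String) (out : Option Int) : Prop := ¬ D_scan_digits_with_underscores_py src pos allowed → out = scan_digits_with_underscores_py_alt src pos allowed
instance (src : String) (pos : Int) (allowed : List String) (out : Option Int) : Decidable (Spec_scan_digits_with_underscores_py src pos allowed out) := by unfold Spec_scan_digits_with_underscores_py; infer_instance

def pvDiffWitness_scan_digits_with_underscores_py : String × Int × List String := ("5", -1, ["5"])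
def pvDiffWitnessOut_scan_digits_with_underscores_py : (Option Int) × (Option Int) := (some 1, none)

-- ===== CLAIM (what is proved, stated in full; the proofs are below) =====
def Claim_unchanged_scan_digits_with_underscores_py : Prop := ∀ (src : String) (pos : Int) (allowed : List String), Dom_scan_digits_with_underscores_py src pos allowed → Pre_scan_digits_with_underscores_py src pos allowed → Spec_scan_digits_with_underscores_py src pos allowed (scan_digits_with_underscores_py src pos allowed)
def Claim_changed_scan_digits_with_underscores_py : Prop := Dom_scan_digits_with_underscores_py (pvDiffWitness_scan_digits_with_underscores_py.1) (pvDiffWitness_scan_digits_with_underscores_py.2.1) (pvDiffWitness_scan_digits_with_underscores_py.2.2) ∧ Pre_scan_digits_with_underscores_py (pvDiffWitness_scan_digits_with_underscores_py.1) (pvDiffWitness_scan_digits_with_underscores_py.2.1) (pvDiffWitness_scan_digits_with_underscores_py.2.2) ∧ D_scan_digits_with_underscores_py (pvDiffWitness_scan_digits_with_underscores_py.1) (pvDiffWitness_scan_digits_with_underscores_py.2.1) (pvDiffWitness_scan_digits_with_underscores_py.2.2) ∧ scan_digits_with_underscores_py (pvDiffWitness_scan_digits_with_underscores_py.1) (pvDiffWitness_scan_digits_with_underscores_py.2.1)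 (pvDiffWitness_scan_digits_with_underscores_py.2.2) = pvDiffWitnessOut_scan_digits_with_underscores_py.1 ∧ scan_digits_with_underscores_py_alt (pvDiffWitness_scan_digits_with_underscores_py.1) (pvDiffWitness_scan_digits_with_underscores_py.2.1) (pvDiffWitness_scan_digits_with_underscores_py.2.2) = pvDiffWitnessOut_scan_digits_with_underscores_py.2 ∧ pvDiffWitnessOut_scan_digits_with_underscores_py.1 ≠ pvDiffWitnessOut_scan_digits_with_underscores_py.2
def Claim_exact_scan_digits_with_underscores_py : Prop := ∀ (src : String) (pos : Int) (allowed : List String), Dom_scan_digits_with_underscores_py src pos allowed → Pre_scan_digits_with_underscores_py src pos allowed → D_scan_digits_with_underscores_py src pos allowed → scan_digits_with_underscores_py src pos allowed ≠ scan_digits_with_underscores_py_alt src pos allowed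

-- ===== LEMMAS AND PROOFS =====

-- membership in Source B's char class = Python's `src[i] in allowed` on the 1-char string
lemma pvMem_iff (c : Char) (allowed : List String) :
    c ∈ pvCls allowed ↔ String.ofList [c] ∈ allowed := by
  unfold pvCls
  rw [List.mem_filterMap]
  constructor
  · rintro ⟨a, ha, hm⟩
    cases hl : a.toList with
    | nil => rw [hl] at hm; simp at hm
    | cons x xs =>
      cases xs with
      | nil =>
        rw [hl] at hm; simp at hm
        have hax : a = String.ofList [x] := by rw [← hl]; simp
        rw [← hm, ← hax]; exact ha
      | cons y ys => rw [hl] at hm; simp at hm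
  · intro h
    exact ⟨String.ofList [c], h, by simp⟩

lemma pvContains_eq (c : Char) (allowed : List String) :
    (pvCls allowed).contains c = pvCharMemA c allowed := by
  by_cases h : String.ofList [c] ∈ allowed
  · have hc : c ∈ pvCls allowed := (pvMem_iff c allowed).mpr h
    simp [pvCharMemA, h, hc]
  · have hc : c ∉ pvCls allowed := fun hc => h ((pvMem_iff c allowed).mp hc)
    simp [pvCharMemA, h, hc]

-- past the end both loops stop at once
lemma pvLoop_ge (s : List Char) (allowed : List String) (q : Nat) (h : s.length ≤ q) :
    pvScanLoopA s allowed (q : Int) = some (q : Int) ∧ pvStarB s (pvCls allowed) q = q := by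
  constructor
  · rw [pvScanLoopA]; simp; omega
  · rw [pvStarB]
    have hx : s[q]? = none := by simp; omega
    simp [hx]

-- A's while loop computes exactly the end of B's greedy star match
lemma pvLoop_eq (k : Nat) : ∀ (s : List Char) (allowed : List String) (q : Nat),
    s.length ≤ q + k →
    pvScanLoopA s allowed (q : Int) = some ((pvStarB s (pvCls allowed) q : Nat) : Int) := by
  induction k with
  | zero =>
    intro s allowed q hk
    rcases pvLoop_ge s allowed q (by omega) with ⟨h1, h2⟩
    rw [h1, h2]
  | succ k ih =>
    intro s allowed q hk
    by_cases hq0 : s.length ≤ q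
    · rcases pvLoop_ge s allowed q hq0 with ⟨h1, h2⟩
      rw [h1, h2]
    · have hq : q < s.length := Nat.lt_of_not_le hq0
      have hget : s[q]? = some s[q] := List.getElem?_eq_getElem hq
      have hA : PySem.List.pyGet? s (q : Int) = some s[q] := by
        rw [PySem.List.pyGet?_natCast, hget]
      have hcast1 : (q : Int) + 1 = ((q + 1 : Nat) : Int) := by push_cast; ring
      have hcast2 : (q : Int) + 2 = ((q + 2 : Nat) : Int) := by push_cast; ring
      have hAnext : PySem.List.pyGet? s ((q : Int) + 1) = s[q+1]? := by
        rw [hcast1, PySem.List.pyGet?_natCast]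
      rw [pvScanLoopA, pvStarB]
      simp only [hA]
      rw [dif_pos (by exact_mod_cast hq)]
      by_cases h1 : s[q]? = some '_' ∧ s[q+1]?.any (pvCls allowed).contains
      · -- B takes the greedy `_X` step to q+2
        rw [dif_pos h1]
        obtain ⟨hu, hany⟩ := h1
        have hc : s[q] = '_' := by rw [hget] at hu; exact Option.some.inj hu
        obtain ⟨c2, hc2⟩ : ∃ c2, s[q+1]? = some c2 := by
          cases hx : s[q+1]? with
          | none => rw [hx] at hany; simp at hany
          | some c2 => exact ⟨c2, rfl⟩
        have hq1 : q + 1 < s.length := (List.getElem?_eq_some_iff.mp hc2).1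
        have hm2 : pvCharMemA c2 allowed = true := by
          rw [hc2] at hany; simp at hany
          rwa [← pvContains_eq, List.contains_iff_mem]
        by_cases hm : pvCharMemA s[q] allowed
        · -- A walks the same two chars one at a time
          rw [if_pos hm, hcast1, pvScanLoopA]
          rw [dif_pos (by exact_mod_cast hq1)]
          have hA1 : PySem.List.pyGet? s ((q + 1 : Nat) : Int) = some c2 := by
            rw [PySem.List.pyGet?_natCast, hc2]
          simp only [hA1]
          rw [if_pos hm2]
          have : ((q + 1 : Nat) : Int) + 1 = ((q + 2 : Nat) : Int) := by push_cast; ring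
          rw [this]
          exact ih s allowed (q + 2) (by omega)
        · rw [if_neg hm]
          have hcond : s[q] = '_' ∧ (q : Int) + 1 < (s.length : Int) ∧
              (PySem.List.pyGet? s ((q : Int) + 1)).any (fun c2 => pvCharMemA c2 allowed) := by
            refine ⟨hc, by exact_mod_cast hq1, ?_⟩
            rw [hAnext, hc2]
            simp [hm2]
          rw [if_pos hcond, hcast2]
          exact ih s allowed (q + 2) (by omega)
      · rw [dif_neg h1]
        by_cases hm : pvCharMemA s[q] allowed
        · -- both advance one char
          have hany : s[q]?.any (pvCls allowed).contains = true := by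
            rw [hget]
            simpa [Option.any, List.contains_iff_mem, pvMem_iff] using
              (by simpa [pvCharMemA] using hm : String.ofList [s[q]] ∈ allowed)
          rw [dif_pos hany, if_pos hm, hcast1]
          exact ih s allowed (q + 1) (by omega)
        · -- both stop at q
          have hany : ¬ s[q]?.any (pvCls allowed).contains = true := by
            rw [hget]
            simp only [Option.any_some, pvContains_eq]
            simp [hm]
          rw [dif_neg hany, if_neg hm]
          have hncond : ¬ (s[q] = '_' ∧ (q : Int) + 1 < (s.length : Int) ∧
              (PySem.List.pyGet? s ((q : Int) + 1)).any (fun c2 => pvCharMemA c2 allowed)) := by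
            rintro ⟨hc, -, hany2⟩
            refine h1 ⟨by rw [hget, hc], ?_⟩
            rw [hAnext] at hany2
            cases hx : s[q+1]? with
            | none => rw [hx] at hany2; simp at hany2
            | some c2 =>
              rw [hx] at hany2
              simp only [Option.any_some] at hany2 ⊢
              rwa [pvContains_eq]
          rw [if_neg hncond]

-- A's loop never raises once started inside Pre_
lemma pvLoop_isSome (k : Nat) : ∀ (s : List Char) (allowed : List String) (i : Int),
    -(s.length : Int) < i → ((s.length : Int) - i).toNat ≤ k →
    (pvScanLoopA s allowed i).isSome := by
  induction k with
  | zero =>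
    intro s allowed i hlo hk
    rw [pvScanLoopA, dif_neg (by omega)]
    simp
  | succ k ih =>
    intro s allowed i hlo hk
    rw [pvScanLoopA]
    by_cases hlt : i < (s.length : Int)
    · rw [dif_pos hlt]
      have hin : PySem.List.pyGet? s i ≠ none := by
        rw [Ne, PySem.List.pyGet?_eq_none_iff]
        intro hni
        exact hni ⟨by omega, by omega⟩
      cases hg : PySem.List.pyGet? s i with
      | none => exact absurd hg hin
      | some c =>
        simp only
        by_cases hm : pvCharMemA c allowed
        · rw [if_pos hm]; exact ih s allowed (i + 1) (by omega) (by omega)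
        · rw [if_neg hm]
          by_cases h2 : c = '_' ∧ i + 1 < (s.length : Int) ∧
              (PySem.List.pyGet? s (i + 1)).any (fun c2 => pvCharMemA c2 allowed)
          · rw [if_pos h2]; exact ih s allowed (i + 2) (by omega) (by omega)
          · rw [if_neg h2]; simp
    · rw [dif_neg hlt]; simp

-- ===== VERDICT (by name: the statement is the Claim_ definition above) =====
theorem scan_digits_with_underscores_py_spec : Claim_unchanged_scan_digits_with_underscores_py := by
  intro src pos allowed _hdom hpre hnd
  have hlen : PySem.Str.len src = (src.toList.length : Int) := PySem.Str.len_eq src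
  have hpre' : -(src.toList.length : Int) ≤ pos := hpre
  by_cases hge : pos ≥ (src.toList.length : Int)
  · -- pos past the end: both None
    rw [scan_digits_with_underscores_py, if_pos (by rw [hlen]; exact hge)]
    rw [scan_digits_with_underscores_py_alt]
    by_cases he : (pvCls allowed).isEmpty
    · rw [if_pos he]
    · rw [if_neg he, if_neg (by omega : ¬ pos < 0)]
      have hnone : src.toList[pos.toNat]? = none := by
        rw [List.getElem?_eq_none_iff]; omega
      rw [if_neg (by rw [hnone]; simp)]
  · have hlt : pos < (src.toList.length : Int) := by omega
    by_cases hneg : pos < 0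
    · -- in-range negative pos outside D_: the wrapped char is not allowed, both None
      have hidx : ((src.toList.length : Int) + pos).toNat < src.toList.length := by omega
      have hk : pos = -(((-pos).toNat : Nat) : Int) := by omega
      have hgetA : PySem.List.pyGet? src.toList pos =
          some (src.toList[((src.toList.length : Int) + pos).toNat]) := by
        have h1 : PySem.List.pyGet? src.toList pos =
            src.toList[((src.toList.length : Int) + pos).toNat]? := by
          conv_lhs => rw [hk]
          rw [PySem.List.pyGet?_neg_natCast src.toList (-pos).toNat (by omega) (by omega)]
          congr 1
          omega
        rw [h1, List.getElem?_eq_getElem hidx]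
      have hnotmem : ¬ String.ofList [src.toList[((src.toList.length : Int) + pos).toNat]] ∈ allowed := by
        intro hmem
        refine hnd ⟨hneg, hpre, ?_⟩
        rwa [List.getElem!_eq_getElem?_getD, List.getElem?_eq_getElem hidx, Option.getD_some]
      rw [scan_digits_with_underscores_py, if_neg (by rw [hlen]; omega)]
      simp only [hgetA]
      rw [if_neg (by simpa [pvCharMemA] using hnotmem)]
      rw [scan_digits_with_underscores_py_alt]
      by_cases he : (pvCls allowed).isEmpty
      · rw [if_pos he]
      · rw [if_neg he, if_pos hneg]
    · -- the normal case 0 ≤ pos < len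
      have hpos : 0 ≤ pos := by omega
      have hpe : pos = (pos.toNat : Int) := by omega
      have hp : pos.toNat < src.toList.length := by omega
      have hgetA : PySem.List.pyGet? src.toList pos = some (src.toList[pos.toNat]) := by
        have h1 : PySem.List.pyGet? src.toList pos = src.toList[pos.toNat]? := by
          conv_lhs => rw [hpe]
          rw [PySem.List.pyGet?_natCast]
        rw [h1, List.getElem?_eq_getElem hp]
      rw [scan_digits_with_underscores_py, if_neg (by rw [hlen]; omega)]
      simp only [hgetA]
      by_cases hm : pvCharMemA (src.toList[pos.toNat]) allowed
      · -- first char matches: A's loop = B's star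
        rw [if_pos hm]
        have hmem : src.toList[pos.toNat] ∈ pvCls allowed :=
          (pvMem_iff _ allowed).mpr (by simpa [pvCharMemA] using hm)
        have hne : ¬ (pvCls allowed).isEmpty := by
          intro he
          rw [List.isEmpty_iff] at he
          rw [he] at hmem
          simp at hmem
        rw [scan_digits_with_underscores_py_alt, if_neg hne, if_neg (by omega : ¬ pos < 0)]
        rw [if_pos (by rw [List.getElem?_eq_getElem hp]; simp only [Option.any_some, pvContains_eq]; exact hm)]
        have hcast : pos + 1 = ((pos.toNat + 1 : Nat) : Int) := by omega
        rw [hcast]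
        exact pvLoop_eq src.toList.length src.toList allowed (pos.toNat + 1) (by omega)
      · -- first char not allowed: both None
        rw [if_neg hm]
        rw [scan_digits_with_underscores_py_alt]
        by_cases he : (pvCls allowed).isEmpty
        · rw [if_pos he]
        · rw [if_neg he, if_neg (by omega : ¬ pos < 0)]
          rw [if_neg (by rw [List.getElem?_eq_getElem hp]; simp only [Option.any_some, pvContains_eq]; simp [hm])]

theorem scan_digits_with_underscores_py_changed : Claim_changed_scan_digits_with_underscores_py := by
  unfold Claim_changed_scan_digits_with_underscores_py
  refine ⟨by decide, by decide, by decide, ?_, ?_, by decide⟩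
  · show scan_digits_with_underscores_py "5" (-1) ["5"] = some 1
    have h1 : pvScanLoopA ['5'] ["5"] 1 = some 1 := by
      rw [pvScanLoopA, dif_neg (by decide)]
    have h0 : pvScanLoopA ['5'] ["5"] 0 = some 1 := by
      rw [pvScanLoopA, dif_pos (by decide)]
      simp only [show PySem.List.pyGet? ['5'] 0 = some '5' from by decide]
      rw [if_pos (by decide)]
      simpa using h1
    rw [scan_digits_with_underscores_py, if_neg (by decide)]
    have hs : "5".toList = ['5'] := by decide
    simp only [hs, show PySem.List.pyGet? ['5'] (-1) = some '5' from by decide]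
    rw [if_pos (by decide)]
    simpa using h0
  · show scan_digits_with_underscores_py_alt "5" (-1) ["5"] = none
    rw [scan_digits_with_underscores_py_alt, if_neg (by decide), if_pos (by decide)]

theorem scan_digits_with_underscores_py_tight : Claim_exact_scan_digits_with_underscores_py := by
  intro src pos allowed _hdom _hpre hD
  obtain ⟨hneg, hlo, hmem⟩ := hD
  have hidx : ((src.toList.length : Int) + pos).toNat < src.toList.length := by omega
  have hmem' : String.ofList [src.toList[((src.toList.length : Int) + pos).toNat]] ∈ allowed := by
    rwa [List.getElem!_eq_getElem?_getD, List.getElem?_eq_getElem hidx, Option.getD_some] at hmem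
  -- B returns none
  have hcls : src.toList[((src.toList.length : Int) + pos).toNat] ∈ pvCls allowed :=
    (pvMem_iff _ allowed).mpr hmem'
  have hne : ¬ (pvCls allowed).isEmpty := by
    intro he
    rw [List.isEmpty_iff] at he
    rw [he] at hcls
    simp at hcls
  have hB : scan_digits_with_underscores_py_alt src pos allowed = none := by
    rw [scan_digits_with_underscores_py_alt, if_neg hne, if_pos hneg]
  -- A returns some value
  have hk : pos = -(((-pos).toNat : Nat) : Int) := by omega
  have hgetA : PySem.List.pyGet? src.toList pos =
      some (src.toList[((src.toList.length : Int) + pos).toNat]) := by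
    have h1 : PySem.List.pyGet? src.toList pos =
        src.toList[((src.toList.length : Int) + pos).toNat]? := by
      conv_lhs => rw [hk]
      rw [PySem.List.pyGet?_neg_natCast src.toList (-pos).toNat (by omega) (by omega)]
      congr 1
      omega
    rw [h1, List.getElem?_eq_getElem hidx]
  have hA : scan_digits_with_underscores_py src pos allowed =
      pvScanLoopA src.toList allowed (pos + 1) := by
    rw [scan_digits_with_underscores_py, if_neg (by rw [PySem.Str.len_eq]; omega)]
    simp only [hgetA]
    rw [if_pos (by simpa [pvCharMemA] using hmem')]
  have hsome : (pvScanLoopA src.toList allowed (pos + 1)).isSome :=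
    pvLoop_isSome ((src.toList.length : Int) - (pos + 1)).toNat src.toList allowed (pos + 1)
      (by omega) (le_refl _)
  rw [hA, hB]
  intro heq
  rw [heq] at hsome
  simp at hsome
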